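-- pv_equiv track=rewrite | github.com/0hhanum/algorithm_study | programmers/cross_bridge.py | solution
-- ===== SOURCE A (Python) =====
-- def solution(stones, k):
--     answer = 0
--     for i in range(len(stones) - k + 1):
--         tmp = stones[i: i + k]
--         minimum = min(tmp)
--         maximum = max(tmp)
--         if maximum - minimum <= k:
--             answer = maximum
--     return answer
-- ===== SOURCE B (Python) =====
-- def solution(stones, k):
--     # One-pass sliding-window min/max with two monotonic deques of indices
--     # (lists with head offsets): O(n) instead of A's per-window slice+min+max.
--     answer = 0
--     maxq, minq = [], []
--     mh = nh = 0
--     for i, x in enumerate(stones):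
--         while len(maxq) > mh and stones[maxq[-1]] <= x:
--             maxq.pop()
--         maxq.append(i)
--         while len(minq) > nh and stones[minq[-1]] >= x:
--             minq.pop()
--         minq.append(i)
--         if i >= k - 1:
--             if maxq[mh] <= i - k:
--                 mh += 1
--             if minq[nh] <= i - k:
--                 nh += 1
--             mx = stones[maxq[mh]]
--             mn = stones[minq[nh]]
--             if mx - mn <= k:
--                 answer = mx
--     return answer
-- ===== Notes on version B (the rewrite author's own statement) =====
-- stated objective: faster
-- what changed: B replaces A's per-window slice + min + max recomputation with a single left-to-right pass maintaining two monotonic deques of indices (sliding-window min/max), so each element is pushed and popped at most once.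
import Mathlib
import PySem

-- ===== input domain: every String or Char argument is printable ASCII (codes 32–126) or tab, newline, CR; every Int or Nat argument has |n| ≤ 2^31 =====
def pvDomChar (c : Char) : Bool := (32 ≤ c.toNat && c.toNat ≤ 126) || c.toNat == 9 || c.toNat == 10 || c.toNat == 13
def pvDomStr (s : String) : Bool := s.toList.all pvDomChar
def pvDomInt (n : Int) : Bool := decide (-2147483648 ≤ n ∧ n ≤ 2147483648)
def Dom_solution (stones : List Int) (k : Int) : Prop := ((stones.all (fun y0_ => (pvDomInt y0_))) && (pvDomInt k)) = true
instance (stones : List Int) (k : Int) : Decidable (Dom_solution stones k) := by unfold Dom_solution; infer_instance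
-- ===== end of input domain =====

-- B replaces A's per-window slice+min+max recomputation with one left-to-right pass
-- maintaining two monotonic deques of indices (sliding-window min/max).

-- ===== PORT A =====
def solution (stones : List Int) (k : Int) : Int :=
  (PySem.List.pyRange 0 (PySem.List.len stones - k + 1) 1).foldl
    (fun answer i =>
      let tmp := PySem.List.slice stones (some i) (some (i + k))
      match PySem.List.min? tmp (fun y => y), PySem.List.max? tmp (fun y => y) with
      | some minimum, some maximum => if maximum - minimum ≤ k then maximum else answer
      | _, _ => answer)  -- unreachable under Pre_ (k ≥ 1): Python's min/max would raise on an empty slice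
    0

-- ===== PORT B =====
-- state of Source B's loop: (answer, maxq, mh, minq, nh)
structure BState where
  answer : Int
  maxq : List Int
  mh : Nat
  minq : List Int
  nh : Nat

-- 'while len(q) > h and cmp(stones[q[-1]], x): q.pop()'
def popTail (stones : List Int) (cmp : Int → Int → Bool) (x : Int) (h : Nat) (q : List Int) :
    List Int :=
  if _hq : h < q.length then
    match q.getLast? with
    | some j =>
      if cmp (PySem.List.pyGetD stones j 0) x then popTail stones cmp x h q.dropLast else q
    | none => q
  else q
termination_by q.length
decreasing_by simp [List.length_dropLast]; omega

-- body of 'for i, x in enumerate(stones)'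
def stepB (stones : List Int) (k : Int) (s : BState) (p : Int × Int) : BState :=
  let i := p.1
  let x := p.2
  let maxq := popTail stones (fun v x => v ≤ x) x s.mh s.maxq ++ [i]
  let minq := popTail stones (fun v x => x ≤ v) x s.nh s.minq ++ [i]
  if k - 1 ≤ i then
    let mh := if PySem.List.pyGetD maxq (s.mh : Int) 0 ≤ i - k then s.mh + 1 else s.mh
    let nh := if PySem.List.pyGetD minq (s.nh : Int) 0 ≤ i - k then s.nh + 1 else s.nh
    let mx := PySem.List.pyGetD stones (PySem.List.pyGetD maxq (mh : Int) 0) 0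
    let mn := PySem.List.pyGetD stones (PySem.List.pyGetD minq (nh : Int) 0) 0
    { answer := if mx - mn ≤ k then mx else s.answer, maxq := maxq, mh := mh, minq := minq,
      nh := nh }
  else
    { answer := s.answer, maxq := maxq, mh := s.mh, minq := minq, nh := s.nh }

def solution_alt (stones : List Int) (k : Int) : Int :=
  ((PySem.List.enumerate stones).foldl (stepB stones k) ⟨0, [], 0, [], 0⟩).answer

-- ===== PRECONDITION & SPEC =====
-- Pre_ excludes k ≤ 0, on which Python A always raises (min/max of an empty slice, ValueError).
def Pre_solution (stones : List Int) (k : Int) : Prop := 1 ≤ k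
instance (stones : List Int) (k : Int) : Decidable (Pre_solution stones k) := by
  unfold Pre_solution; infer_instance
def pvWitness_solution : List Int × Int := ([1, 2, 3], 2)

def Spec_solution (stones : List Int) (k : Int) (out : Int) : Prop := out = solution_alt stones k
instance (stones : List Int) (k : Int) (out : Int) : Decidable (Spec_solution stones k out) := by
  unfold Spec_solution; infer_instance

-- ===== CLAIM =====
def Claim_equal_solution : Prop := ∀ (stones : List Int) (k : Int), Dom_solution stones k →
  Pre_solution stones k → Spec_solution stones k (solution stones k)

-- ===== LEMMAS AND PROOFS =====

-- value at a Nat index (total form; every use below is in range)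
def gN (stones : List Int) (j : Nat) : Int := stones.getD j 0

-- 'j survives against every later index in (j, hi)'
def keepU (stones : List Int) (better : Int → Int → Bool) (hi j : Nat) : Bool :=
  (List.range' (j + 1) (hi - (j + 1))).all (fun j' => better (gN stones j) (gN stones j'))

-- the live (monotone) deque contents for the window [lo, hi)
def wlive (stones : List Int) (better : Int → Int → Bool) (lo hi : Nat) : List Nat :=
  (List.range' lo (hi - lo)).filter (keepU stones better hi)

-- pure pop-from-the-end-while loop (popTail with no dead prefix)
def popEnd (stones : List Int) (cmp : Int → Int → Bool) (x : Int) (q : List Int) : List Int :=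
  match _hq : q.getLast? with
  | some j => if cmp (PySem.List.pyGetD stones j 0) x then popEnd stones cmp x q.dropLast else q
  | none => q
termination_by q.length
decreasing_by
  have hne : q ≠ [] := by intro h; subst h; simp at _hq
  have := List.length_pos_iff.mpr hne
  simp [List.length_dropLast]; omega

-- the window extreme as Source B sees it: fold of comb over the window [lo, hi)
def wfold (stones : List Int) (comb : Int → Int → Int) (lo hi : Nat) : Int :=
  (List.range' (lo + 1) (hi - (lo + 1))).foldl (fun a j => comb a (gN stones j)) (gN stones lo)

-- A's window min / max (Int-indexed)
def gAt (stones : List Int) (j : Int) : Int := PySem.List.pyGetD stones j 0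
def wMin (stones : List Int) (k i : Int) : Int :=
  (PySem.List.pyRange (i + 1) (i + k) 1).foldl (fun a j => min a (gAt stones j)) (gAt stones i)
def wMax (stones : List Int) (k i : Int) : Int :=
  (PySem.List.pyRange (i + 1) (i + k) 1).foldl (fun a j => max a (gAt stones j)) (gAt stones i)

-- A's partial answer once every window ending before index m has been processed
def ansSpec (stones : List Int) (k : Int) (m : Nat) : Int :=
  (List.range' 0 (m + 1 - k.toNat)).foldl
    (fun (acc : Int) (s : Nat) =>
      if wMax stones k (s : Int) - wMin stones k (s : Int) ≤ k then wMax stones k (s : Int)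
      else acc) 0

-- lower edge of the window after m elements were consumed
def wlo (k : Int) (m : Nat) : Nat := m - k.toNat

def bmax : Int → Int → Bool := fun a b => decide (b < a)
def bmin : Int → Int → Bool := fun a b => decide (a < b)

-- the loop invariant of Source B's single pass
def InvB (stones : List Int) (k : Int) (m : Nat) (s : BState) : Prop :=
  s.mh ≤ s.maxq.length ∧ s.nh ≤ s.minq.length ∧
  s.maxq.drop s.mh = (wlive stones bmax (wlo k m) m).map (fun j : Nat => (j : Int)) ∧
  s.minq.drop s.nh = (wlive stones bmin (wlo k m) m).map (fun j : Nat => (j : Int)) ∧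
  s.answer = ansSpec stones k m

-- ---- popEnd / popTail ----

lemma popEnd_nil (stones : List Int) (cmp : Int → Int → Bool) (x : Int) :
    popEnd stones cmp x [] = [] := by
  unfold popEnd; rfl

lemma popEnd_concat (stones : List Int) (cmp : Int → Int → Bool) (x : Int) (l : List Int)
    (j : Int) :
    popEnd stones cmp x (l ++ [j]) =
      if cmp (PySem.List.pyGetD stones j 0) x then popEnd stones cmp x l else l ++ [j] := by
  conv_lhs => rw [popEnd]
  split
  case _ j' hq =>
    rw [List.getLast?_concat] at hq
    injection hq with hq
    subst hq
    rw [List.dropLast_concat]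
  case _ hq =>
    rw [List.getLast?_concat] at hq
    exact absurd hq (by simp)

lemma popTail_of_le (stones : List Int) (cmp : Int → Int → Bool) (x : Int) (h : Nat)
    (q : List Int) (hq : q.length ≤ h) : popTail stones cmp x h q = q := by
  rw [popTail]
  rw [dif_neg (by omega)]

lemma popTail_concat (stones : List Int) (cmp : Int → Int → Bool) (x : Int) (h : Nat)
    (l : List Int) (j : Int) (hl : h ≤ l.length) :
    popTail stones cmp x h (l ++ [j]) =
      if cmp (PySem.List.pyGetD stones j 0) x then popTail stones cmp x h l else l ++ [j] := by
  conv_lhs => rw [popTail]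
  rw [dif_pos (by simp; omega)]
  split
  case _ j' hq =>
    rw [List.getLast?_concat] at hq
    injection hq with hq
    subst hq
    rw [List.dropLast_concat]
  case _ hq =>
    rw [List.getLast?_concat] at hq
    exact absurd hq (by simp)

lemma popTail_split (stones : List Int) (cmp : Int → Int → Bool) (x : Int) (h : Nat) :
    ∀ q : List Int, h ≤ q.length →
      popTail stones cmp x h q = q.take h ++ popEnd stones cmp x (q.drop h) := by
  intro q
  induction q using List.reverseRecOn with
  | nil =>
    intro hq
    rw [popTail_of_le _ _ _ _ _ (by simpa using hq)]
    simp [popEnd_nil]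
  | append_singleton l j ih =>
    intro hq
    by_cases hle : h ≤ l.length
    · rw [popTail_concat _ _ _ _ _ _ hle, List.take_append_of_le_length hle,
        List.drop_append_of_le_length hle, popEnd_concat]
      split_ifs with hc
      · exact ih hle
      · rw [← List.append_assoc, List.take_append_drop]
    · have hlen : (l ++ [j]).length ≤ h := by simp; omega
      rw [popTail_of_le _ _ _ _ _ hlen, List.take_of_length_le hlen,
        List.drop_of_length_le hlen, popEnd_nil, List.append_nil]

lemma popEnd_eq_filter (stones : List Int) (cmp : Int → Int → Bool) (x : Int) :
    ∀ l : List Int,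
      l.Pairwise (fun a b => (!cmp (PySem.List.pyGetD stones b 0) x) = true →
        (!cmp (PySem.List.pyGetD stones a 0) x) = true) →
      popEnd stones cmp x l = l.filter (fun j => !cmp (PySem.List.pyGetD stones j 0) x) := by
  intro l
  induction l using List.reverseRecOn with
  | nil => intro _; simp [popEnd_nil]
  | append_singleton l j ih =>
    intro hpw
    rw [List.pairwise_append] at hpw
    obtain ⟨hl, _, hrel⟩ := hpw
    rw [popEnd_concat, List.filter_append]
    by_cases hc : cmp (PySem.List.pyGetD stones j 0) x = true
    · rw [if_pos hc, ih hl]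
      simp [hc]
    · rw [if_neg hc]
      have hkeep : ∀ a ∈ l, (!cmp (PySem.List.pyGetD stones a 0) x) = true := by
        intro a ha
        exact hrel a ha j (by simp) (by simp [hc])
      rw [List.filter_eq_self.mpr hkeep]
      simp [hc]

-- ---- wlive ----

lemma keepU_last (stones : List Int) (b : Int → Int → Bool) (hi : Nat) :
    keepU stones b (hi + 1) hi = true := by
  simp [keepU]

lemma keepU_succ (stones : List Int) (b : Int → Int → Bool) {hi j : Nat} (hj : j < hi) :
    keepU stones b (hi + 1) j = (keepU stones b hi j && b (gN stones j) (gN stones hi)) := by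
  unfold keepU
  rw [show (hi + 1) - (j + 1) = (hi - (j + 1)) + 1 by omega, List.range'_concat,
    List.all_append, show j + 1 + 1 * (hi - (j + 1)) = hi by omega]
  simp

lemma wlive_succ (stones : List Int) (b : Int → Int → Bool) {lo hi : Nat} (h : lo ≤ hi) :
    wlive stones b lo (hi + 1) =
      (wlive stones b lo hi).filter (fun j => b (gN stones j) (gN stones hi)) ++ [hi] := by
  unfold wlive
  rw [show (hi + 1) - lo = (hi - lo) + 1 by omega, List.range'_concat,
    show lo + 1 * (hi - lo) = hi by omega, List.filter_append, List.filter_filter]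
  congr 1
  · apply List.filter_congr
    intro j hj
    have hj' : j < hi := by
      have := List.mem_range'_1.mp hj
      omega
    rw [keepU_succ stones b hj', Bool.and_comm]
  · simp [keepU_last]

lemma mem_wlive (stones : List Int) (b : Int → Int → Bool) {lo hi j : Nat}
    (h : j ∈ wlive stones b lo hi) : lo ≤ j ∧ j < hi := by
  unfold wlive at h
  have := List.mem_range'_1.mp (List.mem_filter.mp h).1
  omega

lemma wlive_pairwise (stones : List Int) (b : Int → Int → Bool) (lo hi : Nat) :
    (wlive stones b lo hi).Pairwise
      (fun a a' => a < a' ∧ b (gN stones a) (gN stones a') = true) := by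
  have hlt : (wlive stones b lo hi).Pairwise (· < ·) :=
    (List.pairwise_lt_range' 1).filter _
  refine hlt.imp_of_mem ?_
  intro a a' ha ha' hlt'
  refine ⟨hlt', ?_⟩
  have hka : keepU stones b hi a = true := (List.mem_filter.mp ha).2
  have hb' : a' < hi := (mem_wlive stones b ha').2
  unfold keepU at hka
  rw [List.all_eq_true] at hka
  exact hka a' (List.mem_range'_1.mpr (by omega))

lemma wfold_succ (stones : List Int) (comb : Int → Int → Int) {lo hi : Nat} (h : lo < hi) :
    wfold stones comb lo (hi + 1) = comb (wfold stones comb lo hi) (gN stones hi) := by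
  unfold wfold
  rw [show (hi + 1) - (lo + 1) = (hi - (lo + 1)) + 1 by omega, List.range'_concat,
    show lo + 1 + 1 * (hi - (lo + 1)) = hi by omega, List.foldl_append]
  simp

lemma wlive_head (stones : List Int) (b : Int → Int → Bool) (comb : Int → Int → Int)
    (H1 : ∀ a c, b a c = true → comb a c = a) (H2 : ∀ a c, b a c = false → comb a c = c)
    (H3 : ∀ a c d, b a c = true → b c d = true → b a d = true) :
    ∀ hi lo : Nat, lo < hi → ∃ h t, wlive stones b lo hi = h :: t ∧
      gN stones h = wfold stones comb lo hi := by
  intro hi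
  induction hi with
  | zero => intro lo h; omega
  | succ hi ih =>
    intro lo hlo
    rcases Nat.lt_or_ge lo hi with hlt | hge
    · obtain ⟨h, t, hw, hv⟩ := ih lo hlt
      rw [wlive_succ stones b (le_of_lt hlt), hw]
      rw [wfold_succ stones comb hlt]
      by_cases hp : b (gN stones h) (gN stones hi) = true
      · refine ⟨h, t.filter (fun j => b (gN stones j) (gN stones hi)) ++ [hi], ?_, ?_⟩
        · simp [hp]
        · rw [← hv, H1 _ _ hp]
      · have hpw := wlive_pairwise stones b lo hi
        rw [hw] at hpw
        have hfilt : (h :: t).filter (fun j => b (gN stones j) (gN stones hi)) = [] := by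
          rw [List.filter_eq_nil_iff]
          intro a ha
          rcases List.mem_cons.mp ha with rfl | hat
          · simp [hp]
          · have hrel := (List.pairwise_cons.mp hpw).1 a hat
            intro hba
            exact hp (H3 _ _ _ hrel.2 (by simpa using hba))
        refine ⟨hi, [], by rw [hfilt]; rfl, ?_⟩
        rw [← hv, H2 _ _ (by simpa using hp)]
    · have hlo' : lo = hi := by omega
      subst hlo'
      refine ⟨lo, [], ?_, ?_⟩
      · unfold wlive
        rw [show lo + 1 - lo = 1 by omega, List.range'_one]
        simp [keepU_last]
      · unfold wfold
        rw [show lo + 1 - (lo + 1) = 0 by omega]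
        simp

lemma wlive_cons_shift (stones : List Int) (b : Int → Int → Bool) {lo hi : Nat} (h : lo < hi) :
    wlive stones b lo hi =
      (if keepU stones b hi lo then [lo] else []) ++ wlive stones b (lo + 1) hi := by
  unfold wlive
  rw [show hi - lo = (hi - (lo + 1)) + 1 by omega, List.range'_succ, List.filter_cons]
  split_ifs <;> simp

-- ---- ansSpec ----

lemma ansSpec_succ_lt (stones : List Int) (k : Int) {m : Nat} (h : m + 1 < k.toNat) :
    ansSpec stones k (m + 1) = ansSpec stones k m := by
  unfold ansSpec
  rw [show m + 1 + 1 - k.toNat = 0 by omega, show m + 1 - k.toNat = 0 by omega]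

lemma ansSpec_succ_ge (stones : List Int) (k : Int) {m : Nat} (h : k.toNat ≤ m + 1) :
    ansSpec stones k (m + 1) =
      (if wMax stones k ((m + 1 - k.toNat : Nat) : Int) -
            wMin stones k ((m + 1 - k.toNat : Nat) : Int) ≤ k
        then wMax stones k ((m + 1 - k.toNat : Nat) : Int) else ansSpec stones k m) := by
  unfold ansSpec
  rw [show m + 1 + 1 - k.toNat = (m + 1 - k.toNat) + 1 by omega, List.range'_concat,
    List.foldl_append, show 0 + 1 * (m + 1 - k.toNat) = m + 1 - k.toNat by omega]
  simp

-- ---- small list helpers ----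

lemma drop_take_append {α : Type} (q r : List α) (n : Nat) (h : n ≤ q.length) :
    (q.take n ++ r).drop n = r := by
  rw [List.drop_append_of_le_length (by rw [List.length_take]; omega),
    List.drop_of_length_le (by rw [List.length_take]; omega), List.nil_append]

lemma getD_eq_drop_head {α : Type} (l : List α) (n : Nat) (d : α) :
    l.getD n d = (l.drop n).getD 0 d := by
  simp [List.getD_eq_getElem?_getD, List.getElem?_drop]

-- ---- order facts for the two deques ----

lemma bmax_trans : ∀ a c d : Int, bmax a c = true → bmax c d = true → bmax a d = true := by
  intro a c d h1 h2; simp [bmax] at *; omega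

lemma bmin_trans : ∀ a c d : Int, bmin a c = true → bmin c d = true → bmin a d = true := by
  intro a c d h1 h2; simp [bmin] at *; omega

lemma max_H1 : ∀ a c : Int, bmax a c = true → max a c = a := by
  intro a c h; simp [bmax] at h; rw [max_def]; split_ifs <;> omega

lemma max_H2 : ∀ a c : Int, bmax a c = false → max a c = c := by
  intro a c h; simp [bmax] at h; rw [max_def]; split_ifs <;> omega

lemma min_H1 : ∀ a c : Int, bmin a c = true → min a c = a := by
  intro a c h; simp [bmin] at h; rw [min_def]; split_ifs <;> omega

lemma min_H2 : ∀ a c : Int, bmin a c = false → min a c = c := by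
  intro a c h; simp [bmin] at h; rw [min_def]; split_ifs <;> omega

lemma cmp_bmax : ∀ v w : Int, (!(decide (v ≤ w))) = bmax v w := by
  intro v w; by_cases h : v ≤ w <;> simp [bmax, h] <;> omega

lemma cmp_bmin : ∀ v w : Int, (!(decide (w ≤ v))) = bmin v w := by
  intro v w; by_cases h : w ≤ v <;> simp [bmin, h] <;> omega

-- ---- the deque update (pops + append) realises the window shift ----

lemma queue_update (stones : List Int) (b : Int → Int → Bool) (m lo : Nat) (hlo : lo ≤ m)
    (q : List Int) (hh : Nat) (hb : hh ≤ q.length)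
    (hq : q.drop hh = (wlive stones b lo m).map (fun j : Nat => (j : Int)))
    (cmp : Int → Int → Bool) (hcmp : ∀ v w : Int, (!cmp v w) = b v w)
    (H3 : ∀ a c d, b a c = true → b c d = true → b a d = true) :
    popTail stones cmp (stones.getD m 0) hh q ++ [(m : Int)] =
      q.take hh ++ (wlive stones b lo (m + 1)).map (fun j : Nat => (j : Int)) := by
  rw [popTail_split stones cmp _ hh q hb, hq]
  have hpw : ((wlive stones b lo m).map (fun j : Nat => (j : Int))).Pairwise
      (fun a b' => (!cmp (PySem.List.pyGetD stones b' 0) (stones.getD m 0)) = true →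
        (!cmp (PySem.List.pyGetD stones a 0) (stones.getD m 0)) = true) := by
    rw [List.pairwise_map]
    refine (wlive_pairwise stones b lo m).imp_of_mem ?_
    intro a a' _ _ hrel
    rw [PySem.List.pyGetD_natCast, PySem.List.pyGetD_natCast, hcmp, hcmp]
    intro hba
    exact H3 _ _ _ hrel.2 hba
  rw [popEnd_eq_filter _ _ _ _ hpw, List.filter_map]
  have hfun : ((fun j => !cmp (PySem.List.pyGetD stones j 0) (stones.getD m 0)) ∘
      (fun j : Nat => (j : Int))) = fun j : Nat => b (gN stones j) (gN stones m) := by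
    funext j
    simp only [Function.comp]
    rw [PySem.List.pyGetD_natCast, hcmp]
    rfl
  rw [hfun, List.append_assoc]
  congr 1
  rw [wlive_succ stones b hlo, List.map_append]
  rfl

-- ---- the head eviction realises the lower-edge shift ----

lemma evict_live (stones : List Int) (b : Int → Int → Bool) (k : Int) (m : Nat)
    (hk : 1 ≤ k) (hkm : k.toNat ≤ m + 1) (h : Nat) (t : List Nat)
    (hL : wlive stones b (wlo k m) (m + 1) = h :: t) :
    (if ((h : Int)) ≤ (m : Int) - k then t else h :: t) =
      wlive stones b (wlo k (m + 1)) (m + 1) := by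
  have hkc : (k.toNat : Int) = k := Int.toNat_of_nonneg (by omega)
  have hmem : wlo k m ≤ h :=
    (mem_wlive stones b (lo := wlo k m) (hi := m + 1) (by rw [hL]; exact List.mem_cons_self)).1
  by_cases hcase : k.toNat ≤ m
  · have hsh : wlo k (m + 1) = wlo k m + 1 := by unfold wlo; omega
    have hcs := wlive_cons_shift stones b (lo := wlo k m) (hi := m + 1) (by unfold wlo; omega)
    rw [hL] at hcs
    rw [hsh]
    by_cases hcond : ((h : Int)) ≤ (m : Int) - k
    · have hh : h = wlo k m := by unfold wlo at hmem hcond ⊢; omega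
      rw [if_pos hcond]
      by_cases hkeep : keepU stones b (m + 1) (wlo k m) = true
      · rw [if_pos hkeep] at hcs
        subst hh
        simpa using hcs
      · rw [if_neg hkeep] at hcs
        rw [List.nil_append] at hcs
        have : h ∈ wlive stones b (wlo k m + 1) (m + 1) := by
          rw [← hcs]; exact List.mem_cons_self
        have := (mem_wlive stones b this).1
        omega
    · rw [if_neg hcond]
      have hh : h ≠ wlo k m := by
        intro he
        apply hcond
        unfold wlo at he
        omega
      by_cases hkeep : keepU stones b (m + 1) (wlo k m) = true
      · rw [if_pos hkeep] at hcs
        have : h = wlo k m := by simpa using congrArg (fun l => l.headD 0) hcs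
        exact absurd this hh
      · rw [if_neg hkeep] at hcs
        rw [List.nil_append] at hcs
        exact hcs
  · have h1 : wlo k (m + 1) = wlo k m := by unfold wlo; omega
    have hcond : ¬ ((h : Int)) ≤ (m : Int) - k := by omega
    rw [if_neg hcond, h1, hL]

-- ---- bridging A's Int-indexed window extremes to the Nat-indexed folds ----

lemma gAt_natCast (stones : List Int) (j : Nat) : gAt stones (j : Int) = gN stones j := by
  unfold gAt gN
  rw [PySem.List.pyGetD_natCast]

lemma wMax_eq_wfold (stones : List Int) (k : Int) (hk : 1 ≤ k) (j : Nat) :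
    wMax stones k (j : Int) = wfold stones max j (j + k.toNat) := by
  unfold wMax wfold
  rw [PySem.List.pyRange_one, List.foldl_map,
    show (((j : Int)) + k - ((j : Int) + 1)).toNat = k.toNat - 1 by omega,
    show j + k.toNat - (j + 1) = k.toNat - 1 by omega, List.range'_eq_map_range,
    List.foldl_map, gAt_natCast]
  congr 1
  funext a t
  congr 1
  rw [show (j : Int) + 1 + (t : Int) = ((j + 1 + t : Nat) : Int) by push_cast; ring]
  exact gAt_natCast stones (j + 1 + t)

lemma wMin_eq_wfold (stones : List Int) (k : Int) (hk : 1 ≤ k) (j : Nat) :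
    wMin stones k (j : Int) = wfold stones min j (j + k.toNat) := by
  unfold wMin wfold
  rw [PySem.List.pyRange_one, List.foldl_map,
    show (((j : Int)) + k - ((j : Int) + 1)).toNat = k.toNat - 1 by omega,
    show j + k.toNat - (j + 1) = k.toNat - 1 by omega, List.range'_eq_map_range,
    List.foldl_map, gAt_natCast]
  congr 1
  funext a t
  congr 1
  rw [show (j : Int) + 1 + (t : Int) = ((j + 1 + t : Nat) : Int) by push_cast; ring]
  exact gAt_natCast stones (j + 1 + t)

-- ---- characterising A's fold body (slice + min + max) ----

lemma map_gAt_pyRange (stones : List Int) (a b : Int) (h0 : 0 ≤ a)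
    (hb : b ≤ (stones.length : Int)) :
    (PySem.List.pyRange a b 1).map (gAt stones) =
      (stones.drop a.toNat).take (b - a).toNat := by
  rw [PySem.List.pyRange_one, List.map_map]
  apply List.ext_getElem
  · simp only [List.length_map, List.length_range, List.length_take, List.length_drop]
    omega
  · intro idx h1 h2
    simp only [List.getElem_map, List.getElem_range, Function.comp_apply,
      List.getElem_take, List.getElem_drop]
    simp only [List.length_map, List.length_range] at h1
    have hcast : a + (idx : Int) = ((a.toNat + idx : Nat) : Int) := by omega
    rw [gAt, hcast, PySem.List.pyGetD_natCast]
    have hlt : a.toNat + idx < stones.length := by omega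
    rw [List.getD_eq_getElem stones 0 hlt]

lemma window_cons (stones : List Int) (k i : Int) (hk : 1 ≤ k) (h0 : 0 ≤ i)
    (hik : i + k ≤ (stones.length : Int)) :
    PySem.List.slice stones (some i) (some (i + k)) =
      gAt stones i :: (PySem.List.pyRange (i + 1) (i + k) 1).map (gAt stones) := by
  rw [PySem.List.slice_toNat stones h0 (by omega),
    map_gAt_pyRange stones (i + 1) (i + k) (by omega) hik]
  have hi : i.toNat < stones.length := by omega
  rw [List.drop_eq_getElem_cons hi]
  have h1 : (i + k).toNat - i.toNat = k.toNat := by omega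
  have h2 : (i + k - (i + 1)).toNat = k.toNat - 1 := by omega
  have h3 : (i + 1).toNat = i.toNat + 1 := by omega
  rw [h1, h2, h3]
  have hk1 : k.toNat = (k.toNat - 1) + 1 := by omega
  rw [hk1, List.take_succ_cons]
  congr 1
  rw [gAt, PySem.List.pyGetD_eq_getElem stones 0 h0 (by omega)]

lemma bodyA_eq (stones : List Int) (k i : Int) (hk : 1 ≤ k) (h0 : 0 ≤ i)
    (hik : i + k ≤ (stones.length : Int)) :
    PySem.List.min? (PySem.List.slice stones (some i) (some (i + k))) (fun y => y)
        = some (wMin stones k i) ∧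
    PySem.List.max? (PySem.List.slice stones (some i) (some (i + k))) (fun y => y)
        = some (wMax stones k i) := by
  rw [window_cons stones k i hk h0 hik, PySem.List.min?_id_cons, PySem.List.max?_id_cons,
    List.foldl_map, List.foldl_map]
  exact ⟨rfl, rfl⟩

lemma solution_eq_ansSpec (stones : List Int) (k : Int) (hk : 1 ≤ k) :
    solution stones k = ansSpec stones k stones.length := by
  have hstep : solution stones k =
      List.foldl (fun acc i => if wMax stones k i - wMin stones k i ≤ k
        then wMax stones k i else acc) 0
        (PySem.List.pyRange 0 ((stones.length : Int) - k + 1) 1) := by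
    unfold solution
    simp only [PySem.List.len_eq]
    refine PySem.List.foldl_congr_mem _ _ _ _ ?_
    intro acc i hi
    rw [PySem.List.mem_pyRange_one] at hi
    obtain ⟨hmm, hMM⟩ := bodyA_eq stones k i hk hi.1 (by omega)
    simp only [hmm, hMM]
  rw [hstep, PySem.List.pyRange_one, List.foldl_map]
  unfold ansSpec
  rw [show stones.length + 1 - k.toNat = (((stones.length : Int) - k + 1) - 0).toNat by omega,
    ← List.range_eq_range']
  congr 1
  funext acc t
  norm_num

-- ---- the invariant is preserved by one step of Source B's loop ----

lemma stepB_inv (stones : List Int) (k : Int) (hk : 1 ≤ k) (m : Nat) (hm : m < stones.length)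
    (s : BState) (hs : InvB stones k m s) :
    InvB stones k (m + 1) (stepB stones k s ((m : Int), stones.getD m 0)) := by
  obtain ⟨hmb, hnb, hmax, hmin, hans⟩ := hs
  have hkc : (k.toNat : Int) = k := Int.toNat_of_nonneg (by omega)
  have hlo_le : wlo k m ≤ m := by unfold wlo; omega
  have hqmax := queue_update stones bmax m (wlo k m) hlo_le s.maxq s.mh hmb hmax
      (fun v x => decide (v ≤ x)) cmp_bmax bmax_trans
  have hqmin := queue_update stones bmin m (wlo k m) hlo_le s.minq s.nh hnb hmin
      (fun v x => decide (x ≤ v)) cmp_bmin bmin_trans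
  unfold stepB
  dsimp only
  rw [hqmax, hqmin]
  by_cases hbr : k - 1 ≤ (m : Int)
  · rw [if_pos hbr]
    have hkm : k.toNat ≤ m + 1 := by omega
    have hlo'lt : wlo k (m + 1) < m + 1 := by unfold wlo; omega
    obtain ⟨hA, tA, hLA, _⟩ :=
      wlive_head stones bmax max max_H1 max_H2 bmax_trans (m + 1) (wlo k m) (by omega)
    obtain ⟨hI, tI, hLI, _⟩ :=
      wlive_head stones bmin min min_H1 min_H2 bmin_trans (m + 1) (wlo k m) (by omega)
    obtain ⟨hA', tA', hLA', hvA'⟩ :=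
      wlive_head stones bmax max max_H1 max_H2 bmax_trans (m + 1) (wlo k (m + 1)) hlo'lt
    obtain ⟨hI', tI', hLI', hvI'⟩ :=
      wlive_head stones bmin min min_H1 min_H2 bmin_trans (m + 1) (wlo k (m + 1)) hlo'lt
    -- the reads q[mh] at the old offsets
    have hgetA : PySem.List.pyGetD
        (s.maxq.take s.mh ++ (wlive stones bmax (wlo k m) (m + 1)).map (fun j : Nat => (j : Int)))
        ((s.mh : Nat) : Int) 0 = ((hA : Nat) : Int) := by
      rw [PySem.List.pyGetD_natCast, getD_eq_drop_head, drop_take_append _ _ _ hmb, hLA]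
      rfl
    have hgetI : PySem.List.pyGetD
        (s.minq.take s.nh ++ (wlive stones bmin (wlo k m) (m + 1)).map (fun j : Nat => (j : Int)))
        ((s.nh : Nat) : Int) 0 = ((hI : Nat) : Int) := by
      rw [PySem.List.pyGetD_natCast, getD_eq_drop_head, drop_take_append _ _ _ hnb, hLI]
      rfl
    rw [hgetA, hgetI]
    have hevA := evict_live stones bmax k m hk hkm hA tA hLA
    have hevI := evict_live stones bmin k m hk hkm hI tI hLI
    -- the new live parts after the (possible) head eviction
    have hliveA : (s.maxq.take s.mh ++
          (wlive stones bmax (wlo k m) (m + 1)).map (fun j : Nat => (j : Int))).drop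
          (if ((hA : Nat) : Int) ≤ (m : Int) - k then s.mh + 1 else s.mh) =
        (wlive stones bmax (wlo k (m + 1)) (m + 1)).map (fun j : Nat => (j : Int)) := by
      rw [← hevA]
      by_cases hcond : ((hA : Nat) : Int) ≤ (m : Int) - k
      · have hlen : (s.maxq.take s.mh ++ [((hA : Nat) : Int)]).length = s.mh + 1 := by
          simp [List.length_take]; omega
        rw [if_pos hcond, if_pos hcond, hLA]
        rw [show s.maxq.take s.mh ++ (hA :: tA).map (fun j : Nat => (j : Int)) =
            (s.maxq.take s.mh ++ [((hA : Nat) : Int)]) ++ tA.map (fun j : Nat => (j : Int)) by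
          simp]
        rw [List.drop_append, hlen, Nat.sub_self, List.drop_zero,
          List.drop_of_length_le (le_of_eq hlen), List.nil_append]
      · rw [if_neg hcond, if_neg hcond, drop_take_append _ _ _ hmb, hLA]
    have hliveI : (s.minq.take s.nh ++
          (wlive stones bmin (wlo k m) (m + 1)).map (fun j : Nat => (j : Int))).drop
          (if ((hI : Nat) : Int) ≤ (m : Int) - k then s.nh + 1 else s.nh) =
        (wlive stones bmin (wlo k (m + 1)) (m + 1)).map (fun j : Nat => (j : Int)) := by
      rw [← hevI]
      by_cases hcond : ((hI : Nat) : Int) ≤ (m : Int) - k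
      · have hlen : (s.minq.take s.nh ++ [((hI : Nat) : Int)]).length = s.nh + 1 := by
          simp [List.length_take]; omega
        rw [if_pos hcond, if_pos hcond, hLI]
        rw [show s.minq.take s.nh ++ (hI :: tI).map (fun j : Nat => (j : Int)) =
            (s.minq.take s.nh ++ [((hI : Nat) : Int)]) ++ tI.map (fun j : Nat => (j : Int)) by
          simp]
        rw [List.drop_append, hlen, Nat.sub_self, List.drop_zero,
          List.drop_of_length_le (le_of_eq hlen), List.nil_append]
      · rw [if_neg hcond, if_neg hcond, drop_take_append _ _ _ hnb, hLI]
    -- the reads stones[q[mh]] after eviction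
    have hmx : PySem.List.pyGetD stones
        (PySem.List.pyGetD (s.maxq.take s.mh ++
          (wlive stones bmax (wlo k m) (m + 1)).map (fun j : Nat => (j : Int)))
          (((if ((hA : Nat) : Int) ≤ (m : Int) - k then s.mh + 1 else s.mh) : Nat) : Int) 0) 0 =
        wfold stones max (wlo k (m + 1)) (m + 1) := by
      rw [PySem.List.pyGetD_natCast, getD_eq_drop_head, hliveA, hLA']
      rw [List.map_cons, List.getD_cons_zero, PySem.List.pyGetD_natCast]
      exact hvA'
    have hmn : PySem.List.pyGetD stones
        (PySem.List.pyGetD (s.minq.take s.nh ++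
          (wlive stones bmin (wlo k m) (m + 1)).map (fun j : Nat => (j : Int)))
          (((if ((hI : Nat) : Int) ≤ (m : Int) - k then s.nh + 1 else s.nh) : Nat) : Int) 0) 0 =
        wfold stones min (wlo k (m + 1)) (m + 1) := by
      rw [PySem.List.pyGetD_natCast, getD_eq_drop_head, hliveI, hLI']
      rw [List.map_cons, List.getD_cons_zero, PySem.List.pyGetD_natCast]
      exact hvI'
    rw [hmx, hmn]
    refine ⟨?_, ?_, hliveA, hliveI, ?_⟩
    · rw [hLA]
      split_ifs <;> simp [List.length_take] <;> omega
    · rw [hLI]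
      split_ifs <;> simp [List.length_take] <;> omega
    · rw [hans, ansSpec_succ_ge stones k hkm]
      rw [show (m + 1 - k.toNat : Nat) = wlo k (m + 1) by unfold wlo; rfl,
        wMax_eq_wfold stones k hk, wMin_eq_wfold stones k hk,
        show wlo k (m + 1) + k.toNat = m + 1 by unfold wlo; omega]
  · rw [if_neg hbr]
    have hlt : m + 1 < k.toNat := by omega
    have hlo_eq : wlo k (m + 1) = wlo k m := by unfold wlo; omega
    refine ⟨by simp [List.length_take]; omega, by simp [List.length_take]; omega, ?_, ?_, ?_⟩
    · rw [drop_take_append _ _ _ hmb, hlo_eq]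
    · rw [drop_take_append _ _ _ hnb, hlo_eq]
    · rw [hans, ansSpec_succ_lt stones k hlt]

-- ---- folding the invariant over the whole pass ----

lemma fold_inv (stones : List Int) (k : Int) (hk : 1 ≤ k) :
    ∀ m, m ≤ stones.length →
      InvB stones k m
        (((PySem.List.enumerate stones).take m).foldl (stepB stones k) ⟨0, [], 0, [], 0⟩) := by
  intro m
  induction m with
  | zero =>
    intro _
    have hk' : 1 ≤ k.toNat := by omega
    refine ⟨by simp, by simp, ?_, ?_, ?_⟩
    · simp [wlive, wlo]
    · simp [wlive, wlo]
    · simp [ansSpec, show 0 + 1 - k.toNat = 0 by omega]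
  | succ m ih =>
    intro hm1
    have hm : m < stones.length := by omega
    have htake : (PySem.List.enumerate stones).take (m + 1) =
        (PySem.List.enumerate stones).take m ++ [((m : Int), stones.getD m 0)] := by
      rw [List.take_succ]
      congr 1
      rw [PySem.List.getElem?_enumerate, List.getElem?_eq_getElem hm]
      simp [List.getD_eq_getElem?_getD, List.getElem?_eq_getElem hm]
    rw [htake, List.foldl_append]
    exact stepB_inv stones k hk m hm _ (ih (by omega))

-- ===== VERDICT =====
theorem solution_spec : Claim_equal_solution := by
  intro stones k _ hk
  have hk1 : 1 ≤ k := hk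
  show solution stones k = solution_alt stones k
  have h := fold_inv stones k hk1 stones.length (le_refl _)
  rw [List.take_of_length_le (by rw [PySem.List.length_enumerate])] at h
  unfold solution_alt
  rw [h.2.2.2.2]
  exact solution_eq_ansSpec stones k hk1
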